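-- pv_equiv track=rewrite | github.com/RyoN1126/stock_ai_gpt | aggregate.py | max_losing_streak
-- ===== SOURCE A (Python) =====
-- from typing import Dict, Any, List, Optional, Tuple
--
-- def max_losing_streak(resolved_outcomes: List[str]) -> int:
--     mx = 0
--     cur = 0
--     for o in resolved_outcomes:
--         if o == "LOSS":
--             cur += 1
--             mx = max(mx, cur)
--         elif o == "WIN":
--             cur = 0
--     return mx
-- ===== SOURCE B (Python) =====
-- def max_losing_streak(resolved_outcomes):
--     # Split into maximal segments separated by "WIN" (DRAW etc. stay inside
--     # a segment), then the answer is the largest per-segment LOSS count.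
--     segments = []
--     current = []
--     for o in resolved_outcomes:
--         if o == "WIN":
--             segments.append(current)
--             current = []
--         else:
--             current.append(o)
--     segments.append(current)
--     return max(seg.count("LOSS") for seg in segments)
-- ===== Notes on version B (the rewrite author's own statement) =====
-- stated objective: alternative
-- what changed: Replaces the single running-counter-with-max loop by a build-then-reduce shape: split the list into WIN-separated segments, then take the maximum LOSS count over the segments.
import Mathlib
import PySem

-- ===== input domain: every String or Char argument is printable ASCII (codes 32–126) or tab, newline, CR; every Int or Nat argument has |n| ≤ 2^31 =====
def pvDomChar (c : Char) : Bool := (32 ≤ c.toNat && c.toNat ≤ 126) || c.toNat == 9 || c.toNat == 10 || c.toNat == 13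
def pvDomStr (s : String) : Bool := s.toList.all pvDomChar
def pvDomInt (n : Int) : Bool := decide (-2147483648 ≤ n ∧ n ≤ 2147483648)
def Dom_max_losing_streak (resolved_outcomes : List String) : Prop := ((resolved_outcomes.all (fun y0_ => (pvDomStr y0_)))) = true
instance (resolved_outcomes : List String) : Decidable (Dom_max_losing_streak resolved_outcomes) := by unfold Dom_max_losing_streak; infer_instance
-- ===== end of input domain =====

-- B replaces A's running-counter loop by split-into-WIN-separated-segments then max of per-segment LOSS counts (alternative decomposition, same cost).


-- ===== PORT A =====
-- A: one pass with a running counter cur and running maximum mx.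
def max_losing_streak (resolved_outcomes : List String) : Int :=
  (resolved_outcomes.foldl
    (fun (st : Int × Int) o =>
      if o == "LOSS" then (max st.1 (st.2 + 1), st.2 + 1)
      else if o == "WIN" then (st.1, 0)
      else (st.1, st.2))
    (0, 0)).1

-- ===== PORT B =====
-- B: build the WIN-separated segments in one pass, then max of LOSS counts.
def mlsStep (st : List (List String) × List String) (o : String) : List (List String) × List String :=
  if o == "WIN" then (st.1 ++ [st.2], [])
  else (st.1, st.2 ++ [o])

def max_losing_streak_alt (resolved_outcomes : List String) : Int :=
  let st := resolved_outcomes.foldl mlsStep ([], [])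
  let segments := st.1 ++ [st.2]
  let counts := segments.map (fun seg => (seg.count "LOSS" : Int))
  match counts with
  | [] => 0   -- unreachable: segments is nonempty (Python's max sees a nonempty list)
  | c :: cs => cs.foldl max c

-- ===== PRECONDITION & SPEC =====
def Spec_max_losing_streak (resolved_outcomes : List String) (out : Int) : Prop := out = max_losing_streak_alt resolved_outcomes
instance (resolved_outcomes : List String) (out : Int) : Decidable (Spec_max_losing_streak resolved_outcomes out) := by unfold Spec_max_losing_streak; infer_instance

-- ===== CLAIM (what is proved, stated in full; the proofs are below) =====
def Claim_equal_max_losing_streak : Prop := ∀ (resolved_outcomes : List String), Dom_max_losing_streak resolved_outcomes → Spec_max_losing_streak resolved_outcomes (max_losing_streak resolved_outcomes)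

-- ===== LEMMAS AND PROOFS =====

-- invariant bookkeeping: loss counts of all segments so far (open segment included), and their running max from 0
def mlsCounts (st : List (List String) × List String) : List Int :=
  (st.1 ++ [st.2]).map (fun seg => (seg.count "LOSS" : Int))

def mlsM (l : List Int) : Int := l.foldl max 0

theorem init_le_foldl_max (l : List Int) (a : Int) : a ≤ List.foldl max a l := by
  induction l generalizing a with
  | nil => simp
  | cons x xs ih => exact le_trans (le_max_left a x) (ih _)

theorem foldl_max_append_singleton (l : List Int) (a x : Int) :
    List.foldl max a (l ++ [x]) = max (List.foldl max a l) x := by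
  simp [List.foldl_append]

theorem mlsM_win (st : List (List String) × List String) :
    mlsM (mlsCounts (st.1 ++ [st.2], ([] : List String))) = mlsM (mlsCounts st) := by
  show List.foldl max 0 (((st.1 ++ [st.2]) ++ [([] : List String)]).map
        (fun seg => (seg.count "LOSS" : Int))) = _
  simp only [List.map_append, List.map_cons, List.map_nil]
  rw [foldl_max_append_singleton]
  simp only [List.count_nil, Int.natCast_zero]
  unfold mlsM mlsCounts
  simp only [List.map_append, List.map_cons, List.map_nil]
  exact max_eq_left (init_le_foldl_max _ 0)

theorem mlsM_push (st : List (List String) × List String) (o : String) :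
    mlsM (mlsCounts (st.1, st.2 ++ [o]))
      = max (mlsM (mlsCounts st)) (((st.2 ++ [o]).count "LOSS" : Int)) := by
  show List.foldl max 0 ((st.1 ++ [st.2 ++ [o]]).map (fun seg => (seg.count "LOSS" : Int)))
      = max (List.foldl max 0 ((st.1 ++ [st.2]).map (fun seg => (seg.count "LOSS" : Int)))) _
  simp only [List.map_append, List.map_cons, List.map_nil]
  rw [foldl_max_append_singleton, foldl_max_append_singleton]
  by_cases h : o = "LOSS"
  · subst h
    have hc : ((st.2 ++ ["LOSS"]).count "LOSS" : Int) = (st.2.count "LOSS" : Int) + 1 := by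
      simp [List.count_append]
    rw [hc, max_assoc, max_eq_right (by omega : (st.2.count "LOSS" : Int) ≤ (st.2.count "LOSS" : Int) + 1)]
  · have hc : ((st.2 ++ [o]).count "LOSS" : Int) = (st.2.count "LOSS" : Int) := by
      simp [List.count_append, h]
    rw [hc, max_assoc, max_self]

theorem mls_loop (xs : List String) (st : List (List String) × List String) :
    xs.foldl
      (fun (p : Int × Int) o =>
        if o == "LOSS" then (max p.1 (p.2 + 1), p.2 + 1)
        else if o == "WIN" then (p.1, 0)
        else (p.1, p.2))
      (mlsM (mlsCounts st), (st.2.count "LOSS" : Int))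
    = (mlsM (mlsCounts (xs.foldl mlsStep st)),
       ((xs.foldl mlsStep st).2.count "LOSS" : Int)) := by
  induction xs generalizing st with
  | nil => rfl
  | cons o rest ih =>
      simp only [List.foldl_cons]
      by_cases hW : o = "WIN"
      · subst hW
        rw [if_neg (by decide), if_pos (by decide)]
        have h1 : mlsStep st "WIN" = (st.1 ++ [st.2], []) := by simp [mlsStep]
        have hinit : ((mlsM (mlsCounts st), (0 : Int)))
            = (mlsM (mlsCounts (mlsStep st "WIN")), ((mlsStep st "WIN").2.count "LOSS" : Int)) := by
          rw [h1, mlsM_win]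
          simp
        rw [hinit]; exact ih (mlsStep st "WIN")
      · have h1 : mlsStep st o = (st.1, st.2 ++ [o]) := by simp [mlsStep, hW]
        by_cases hL : o = "LOSS"
        · subst hL
          rw [if_pos (by decide)]
          have hc : ((st.2 ++ ["LOSS"]).count "LOSS" : Int) = (st.2.count "LOSS" : Int) + 1 := by
            simp [List.count_append]
          have hinit : ((max (mlsM (mlsCounts st)) ((st.2.count "LOSS" : Int) + 1), (st.2.count "LOSS" : Int) + 1))
              = (mlsM (mlsCounts (mlsStep st "LOSS")), ((mlsStep st "LOSS").2.count "LOSS" : Int)) := by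
            rw [h1, mlsM_push, hc]
          rw [hinit]; exact ih (mlsStep st "LOSS")
        · rw [if_neg (by simp [hL]), if_neg (by simp [hW])]
          have hc : ((st.2 ++ [o]).count "LOSS" : Int) = (st.2.count "LOSS" : Int) := by
            simp [List.count_append, hL]
          have hinit : ((mlsM (mlsCounts st), (st.2.count "LOSS" : Int)))
              = (mlsM (mlsCounts (mlsStep st o)), ((mlsStep st o).2.count "LOSS" : Int)) := by
            rw [h1, mlsM_push, hc]
            have hle : ((st.2.count "LOSS" : Int)) ≤ mlsM (mlsCounts st) := by
              unfold mlsM mlsCounts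
              simp only [List.map_append, List.map_cons, List.map_nil]
              rw [foldl_max_append_singleton]
              exact le_max_right _ _
            rw [max_eq_left hle]
          rw [hinit]; exact ih (mlsStep st o)

theorem alt_eq_mlsM (xs : List String) :
    max_losing_streak_alt xs = mlsM (mlsCounts (xs.foldl mlsStep ([], []))) := by
  unfold max_losing_streak_alt
  set st := xs.foldl mlsStep ([], []) with hst
  show (match (st.1 ++ [st.2]).map (fun seg => (seg.count "LOSS" : Int)) with
        | [] => (0 : Int)
        | c :: cs => cs.foldl max c) = mlsM (mlsCounts st)
  cases hcs : (st.1 ++ [st.2]).map (fun seg => (seg.count "LOSS" : Int)) with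
  | nil => simp at hcs
  | cons c cs =>
      have hc : 0 ≤ c := by
        have hm : c ∈ (st.1 ++ [st.2]).map (fun seg => (seg.count "LOSS" : Int)) := by
          rw [hcs]; exact List.mem_cons_self
        obtain ⟨seg, _, rfl⟩ := List.mem_map.mp hm
        positivity
      unfold mlsM mlsCounts
      rw [hcs]
      simp [List.foldl_cons, max_eq_right hc]

-- ===== VERDICT (by name: the statement is the Claim_ definition above) =====
theorem max_losing_streak_spec : Claim_equal_max_losing_streak := by
  intro xs _
  unfold Spec_max_losing_streak max_losing_streak
  rw [alt_eq_mlsM]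
  have h := mls_loop xs ([], [])
  have h0 : mlsM (mlsCounts (([] : List (List String)), ([] : List String))) = 0 := by decide
  rw [h0] at h
  simp only [List.count_nil, Int.natCast_zero] at h
  rw [h]
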